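-- pv_equiv track=rewrite | github.com/hj2687787246/ai-coding-commander | legacy/agent-runtime/commander/transport/scripts/commander_host_runtime.py | _owned_path_overlaps
-- ===== SOURCE A (Python) =====
-- def _normalize_path_scope(value: str) -> str:
--     normalized = value.replace("\\", "/").strip().strip("/")
--     while normalized.startswith("./"):
--         normalized = normalized[2:]
--     return normalized
--
-- def _path_scopes_overlap(left: str, right: str) -> bool:
--     normalized_left = _normalize_path_scope(left)
--     normalized_right = _normalize_path_scope(right)
--     if not normalized_left or not normalized_right:
--         return False
--     return (
--         normalized_left == normalized_right
--         or normalized_left.startswith(f"{normalized_right}/")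
--         or normalized_right.startswith(f"{normalized_left}/")
--     )
--
-- def _owned_path_overlaps(
--     session_owned_paths: list[str],
--     requested_owned_paths: list[str],
-- ) -> list[dict[str, str]]:
--     overlaps: list[dict[str, str]] = []
--     seen: set[tuple[str, str]] = set()
--     for session_path in session_owned_paths:
--         for requested_path in requested_owned_paths:
--             if not _path_scopes_overlap(session_path, requested_path):
--                 continue
--             key = (session_path, requested_path)
--             if key in seen:
--                 continue
--             seen.add(key)
--             overlaps.append(
--                 {
--                     "session_owned_path": session_path,
--                     "requested_owned_path": requested_path,
--                 }
--             )
--     return overlaps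
-- ===== SOURCE B (Python) =====
-- def _normalize(value):
--     v = value.replace("\\", "/").strip().strip("/")
--     while v.startswith("./"):
--         v = v[2:]
--     return v
--
--
-- def _seg_prefixes(norm):
--     # every prefix of `norm` that ends at a segment boundary, shortest first,
--     # including `norm` itself: 'a/b/c' -> ['a', 'a/b', 'a/b/c']
--     return [norm[:i] for i, ch in enumerate(norm) if ch == "/"] + [norm]
--
--
-- def _owned_path_overlaps(session_owned_paths, requested_owned_paths):
--     # Inverted prefix index over the requested paths instead of a pairwise scan:
--     # `exact` maps a normalized requested path to the indices bearing it, `cover`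
--     # maps every segment prefix of a normalized requested path to those indices.
--     # A session path s then overlaps exactly the requested paths indexed under
--     # cover[norm(s)] (s equal to or above them) plus those in exact[q] for each
--     # proper segment prefix q of norm(s) (s strictly below them); sorting the
--     # collected indices restores the requested-list emission order.
--     req = list(dict.fromkeys(requested_owned_paths))
--     exact = {}
--     cover = {}
--     for i, r in enumerate(req):
--         nr = _normalize(r)
--         if not nr:
--             continue
--         exact.setdefault(nr, []).append(i)
--         for q in _seg_prefixes(nr):
--             cover.setdefault(q, []).append(i)
--     overlaps = []
--     for s in dict.fromkeys(session_owned_paths):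
--         ns = _normalize(s)
--         if not ns:
--             continue
--         hits = list(cover.get(ns, []))
--         for q in _seg_prefixes(ns)[:-1]:
--             hits.extend(exact.get(q, []))
--         for i in sorted(hits):
--             overlaps.append(
--                 {"session_owned_path": s, "requested_owned_path": req[i]}
--             )
--     return overlaps
-- ===== Notes on version B (the rewrite author's own statement) =====
-- stated objective: faster
-- what changed: Replaces A's nested pairwise overlap test with an inverted index: each normalized requested path is registered once under its own norm and under all its segment prefixes, so a session path finds all overlapping requested paths by dictionary lookups on its own prefixes (no inner scan), with index sorting restoring the emission order.
import Mathlib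
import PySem

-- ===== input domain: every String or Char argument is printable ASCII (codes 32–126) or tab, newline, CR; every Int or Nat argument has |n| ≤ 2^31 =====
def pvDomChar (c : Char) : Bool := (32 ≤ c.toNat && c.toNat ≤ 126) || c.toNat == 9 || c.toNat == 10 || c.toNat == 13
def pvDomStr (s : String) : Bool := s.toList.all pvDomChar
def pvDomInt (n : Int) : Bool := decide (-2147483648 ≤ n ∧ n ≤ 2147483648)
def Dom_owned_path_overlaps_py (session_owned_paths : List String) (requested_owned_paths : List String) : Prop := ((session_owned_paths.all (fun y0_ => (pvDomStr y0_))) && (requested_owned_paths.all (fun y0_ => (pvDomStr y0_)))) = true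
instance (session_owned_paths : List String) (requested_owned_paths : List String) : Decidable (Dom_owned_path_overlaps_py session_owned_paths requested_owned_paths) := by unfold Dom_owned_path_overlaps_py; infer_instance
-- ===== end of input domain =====

-- B replaces A's nested pairwise overlap scan by an inverted index of the requested paths'
-- segment prefixes, queried once per session path; same return value, asymptotically fewer comparisons.

-- ===== PORT A =====
-- the `while normalized.startswith("./")` loop of _normalize_path_scope (shared helper of both Pythons);
-- v[2:] is PySem.List.slice v (some 2) none — exact
def pvDropDotSlash (v : List Char) : List Char :=
  if PySem.Chars.startswith v ['.', '/'] then
    pvDropDotSlash (PySem.List.slice v (some 2) none)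
  else v
termination_by v.length
decreasing_by
  rename_i h
  have hp : ['.', '/'] <+: v := (PySem.Chars.startswith_iff _ _).1 h
  have hlen : 2 ≤ v.length := by simpa using hp.length_le
  rw [PySem.List.slice_from v (by norm_num : (0:Int) ≤ 2)]
  simp only [List.length_drop]
  omega

-- _normalize_path_scope (= B's _normalize): the result str is kept as its char list, it is only
-- compared / prefix-tested downstream — exact
def pvNormPathScope (value : String) : List Char :=
  pvDropDotSlash (PySem.Chars.stripChars (PySem.Chars.strip (PySem.Chars.replace value.toList ['\\'] ['/'])) ['/'])

-- _path_scopes_overlap; f"{x}/" is the char-list append x ++ ['/'] — exact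
def pvPathScopesOverlap (left : String) (right : String) : Bool :=
  let nl := pvNormPathScope left
  let nr := pvNormPathScope right
  if nl.isEmpty || nr.isEmpty then false
  else nl == nr || PySem.Chars.startswith nl (nr ++ ['/']) || PySem.Chars.startswith nr (nl ++ ['/'])

-- body of A's inner `for requested_path in requested_owned_paths` loop
def pvInnerStep (session_path : String)
    (st : List (List (String × String)) × PySem.Set (String × String)) (requested_path : String) :
    List (List (String × String)) × PySem.Set (String × String) :=
  if !(pvPathScopesOverlap session_path requested_path) then st
  else if PySem.Set.contains st.2 (session_path, requested_path) then st
  else (st.1 ++ [[("session_owned_path", session_path), ("requested_owned_path", requested_path)]],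
        PySem.Set.add st.2 (session_path, requested_path))

-- body of A's outer `for session_path in session_owned_paths` loop
def pvOuterStep (requested_owned_paths : List String)
    (st : List (List (String × String)) × PySem.Set (String × String)) (session_path : String) :
    List (List (String × String)) × PySem.Set (String × String) :=
  requested_owned_paths.foldl (pvInnerStep session_path) st

def owned_path_overlaps_py (session_owned_paths : List String) (requested_owned_paths : List String) : List (List (String × String)) :=
  (session_owned_paths.foldl (pvOuterStep requested_owned_paths)
    (([], PySem.Set.empty) : List (List (String × String)) × PySem.Set (String × String))).1

-- ===== PORT B =====
-- _seg_prefixes: [norm[:i] for i, ch in enumerate(norm) if ch == "/"] + [norm]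
def pvSegPrefixes (norm : List Char) : List (List Char) :=
  ((PySem.List.enumerate norm).filter (fun p => p.2 == '/')).map
    (fun p => PySem.List.slice norm none (some p.1)) ++ [norm]

-- body of B's index-building loop `for i, r in enumerate(req)` over the state (exact, cover);
-- d.setdefault(k, []).append(i) leaves the dict exactly as d.modify k [] (· ++ [i])
def pvIdxStep (st : PySem.Dict (List Char) (List Int) × PySem.Dict (List Char) (List Int))
    (p : Int × String) :
    PySem.Dict (List Char) (List Int) × PySem.Dict (List Char) (List Int) :=
  let nr := pvNormPathScope p.2
  if nr.isEmpty then st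
  else
    (st.1.modify nr [] (· ++ [p.1]),
     (pvSegPrefixes nr).foldl (fun d q => d.modify q [] (· ++ [p.1])) st.2)

def owned_path_overlaps_py_alt (session_owned_paths : List String) (requested_owned_paths : List String) : List (List (String × String)) :=
  let req := PySem.List.dedup requested_owned_paths
  let idx := (PySem.List.enumerate req).foldl pvIdxStep (PySem.Dict.empty, PySem.Dict.empty)
  (PySem.List.dedup session_owned_paths).foldl
    (fun overlaps s =>
      let ns := pvNormPathScope s
      if ns.isEmpty then overlaps
      else
        let hits := (PySem.List.slice (pvSegPrefixes ns) none (some (-1))).foldl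
          (fun h q => h ++ idx.1.getD q []) (idx.2.getD ns [])
        overlaps ++ (PySem.List.sorted hits (fun x => x) false).map
          (fun i => [("session_owned_path", s),
                     ("requested_owned_path", PySem.List.pyGetD req i "")]))
    []

-- ===== PRECONDITION & SPEC =====
def Spec_owned_path_overlaps_py (session_owned_paths : List String) (requested_owned_paths : List String) (out : List (List (String × String))) : Prop := out = owned_path_overlaps_py_alt session_owned_paths requested_owned_paths
instance (session_owned_paths : List String) (requested_owned_paths : List String) (out : List (List (String × String))) : Decidable (Spec_owned_path_overlaps_py session_owned_paths requested_owned_paths out) := by unfold Spec_owned_path_overlaps_py; infer_instance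

-- ===== CLAIM (what is proved, stated in full; the proofs are below) =====
def Claim_equal_owned_path_overlaps_py : Prop := ∀ (session_owned_paths : List String) (requested_owned_paths : List String), Dom_owned_path_overlaps_py session_owned_paths requested_owned_paths → Spec_owned_path_overlaps_py session_owned_paths requested_owned_paths (owned_path_overlaps_py session_owned_paths requested_owned_paths)

-- ===== LEMMAS AND PROOFS =====

def pvRow (s r : String) : List (String × String) :=
  [("session_owned_path", s), ("requested_owned_path", r)]

-- one output row group per (distinct, overlap-tested) session path
def pvRowList (requested_owned_paths : List String) (s : String) : List (List (String × String)) :=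
  ((PySem.List.dedup requested_owned_paths).filter (fun r => pvPathScopesOverlap s r)).map (pvRow s)

-- filtering after discarding x when x fails the filter anyway
theorem pv_filter_discard {α : Type} [BEq α] [LawfulBEq α] (l : List α) (p : α → Bool) (x : α)
    (hx : p x = false) : (PySem.Set.discard l x).filter p = l.filter p := by
  unfold PySem.Set.discard
  rw [List.filter_filter]
  apply List.filter_congr
  intro a _
  by_cases h : a = x
  · subst h; simp [hx]
  · simp [h]

-- strengthening a filter with "≠ x" is filtering the discard
theorem pv_filter_and_ne {α : Type} [BEq α] [LawfulBEq α] (l : List α) (p : α → Bool) (x : α) :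
    l.filter (fun y => p y && !(y == x)) = (PySem.Set.discard l x).filter p := by
  unfold PySem.Set.discard
  rw [List.filter_filter]

theorem pv_inner_spec (s : String) (rs : List String)
    (acc : List (List (String × String))) (seen : PySem.Set (String × String)) :
    (rs.foldl (pvInnerStep s) (acc, seen)).1 =
      acc ++ ((PySem.List.dedup rs).filter
        (fun r => pvPathScopesOverlap s r && !(PySem.Set.contains seen (s, r)))).map (pvRow s)
    ∧ ∀ p : String × String, p ∈ (rs.foldl (pvInnerStep s) (acc, seen)).2 ↔
        (p ∈ seen ∨ ∃ r ∈ rs, pvPathScopesOverlap s r = true ∧ p = (s, r)) := by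
  simp only [PySem.List.dedup_eq_ofList]
  induction rs generalizing acc seen with
  | nil => simp [PySem.Set.ofList]
  | cons r rs ih =>
    rw [List.foldl_cons]
    by_cases hov : pvPathScopesOverlap s r = true
    · by_cases hcon : (s, r) ∈ seen
      · have hconb : PySem.Set.contains seen (s, r) = true := by
          simp only [PySem.Set.contains_eq_listContains, List.contains_eq_mem,
            decide_eq_true_eq]
          exact hcon
        have hstep : pvInnerStep s (acc, seen) r = (acc, seen) := by
          simp [pvInnerStep, hov, hcon]
        rw [hstep]
        obtain ⟨h1, h2⟩ := ih acc seen
        have hpr : (pvPathScopesOverlap s r && !(PySem.Set.contains seen (s, r))) = false := by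
          rw [hconb]; simp
        refine ⟨?_, ?_⟩
        · rw [h1]
          congr 1
          rw [PySem.Set.ofList_cons, List.filter_cons,
            if_neg (by simp only [hpr]; exact Bool.false_ne_true),
            pv_filter_discard (PySem.Set.ofList rs)
              (fun r' => pvPathScopesOverlap s r' && !(PySem.Set.contains seen (s, r'))) r hpr]
        · intro p
          rw [h2 p]
          constructor
          · rintro (h | ⟨r', hr', ho, hp⟩)
            · exact Or.inl h
            · exact Or.inr ⟨r', List.mem_cons_of_mem _ hr', ho, hp⟩
          · rintro (h | ⟨r', hr', ho, hp⟩)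
            · exact Or.inl h
            · rcases List.mem_cons.mp hr' with rfl | hr'
              · exact Or.inl (hp ▸ hcon)
              · exact Or.inr ⟨r', hr', ho, hp⟩
      · have hconb : PySem.Set.contains seen (s, r) = false := by
          simp only [PySem.Set.contains_eq_listContains, List.contains_eq_mem,
            decide_eq_false_iff_not]
          exact hcon
        have hstep : pvInnerStep s (acc, seen) r
            = (acc ++ [pvRow s r], PySem.Set.add seen (s, r)) := by
          simp [pvInnerStep, hov, hcon, pvRow]
        rw [hstep]
        obtain ⟨h1, h2⟩ := ih (acc ++ [pvRow s r]) (PySem.Set.add seen (s, r))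
        have hadd : ∀ r' : String, PySem.Set.contains (PySem.Set.add seen (s, r)) (s, r')
            = (PySem.Set.contains seen (s, r') || (r' == r)) := by
          intro r'
          rw [PySem.Set.add_of_not_mem hcon]
          simp only [PySem.Set.contains_eq_listContains, List.contains_append]
          congr 1
          by_cases h : r' = r
          · subst h; simp
          · simp [h]
        have hfilter : (PySem.Set.ofList rs).filter
              (fun r' => pvPathScopesOverlap s r' && !(PySem.Set.contains (PySem.Set.add seen (s, r)) (s, r')))
            = (PySem.Set.discard (PySem.Set.ofList rs) r).filter
              (fun r' => pvPathScopesOverlap s r' && !(PySem.Set.contains seen (s, r'))) := by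
          rw [← pv_filter_and_ne (PySem.Set.ofList rs)
            (fun r' => pvPathScopesOverlap s r' && !(PySem.Set.contains seen (s, r'))) r]
          apply List.filter_congr
          intro a _
          rw [hadd a, Bool.not_or, ← Bool.and_assoc]
        refine ⟨?_, ?_⟩
        · rw [h1, hfilter, PySem.Set.ofList_cons, List.filter_cons,
            if_pos (by rw [hov, hconb]; rfl), List.map_cons]
          simp [List.append_assoc]
        · intro p
          rw [h2 p]
          constructor
          · rintro (hp | ⟨r', hr', ho, hp⟩)
            · rcases (PySem.Set.mem_add _ _ _).mp hp with h | rfl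
              · exact Or.inl h
              · exact Or.inr ⟨r, List.mem_cons_self, hov, rfl⟩
            · exact Or.inr ⟨r', List.mem_cons_of_mem _ hr', ho, hp⟩
          · rintro (hp | ⟨r', hr', ho, hp⟩)
            · exact Or.inl ((PySem.Set.mem_add _ _ _).mpr (Or.inl hp))
            · rcases List.mem_cons.mp hr' with rfl | hr'
              · exact Or.inl ((PySem.Set.mem_add _ _ _).mpr (Or.inr hp))
              · exact Or.inr ⟨r', hr', ho, hp⟩
    · have hovb : pvPathScopesOverlap s r = false := by
        simp [hov]
      have hstep : pvInnerStep s (acc, seen) r = (acc, seen) := by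
        simp [pvInnerStep, hovb]
      rw [hstep]
      obtain ⟨h1, h2⟩ := ih acc seen
      have hpr : (pvPathScopesOverlap s r && !(PySem.Set.contains seen (s, r))) = false := by
        rw [hovb]; simp
      refine ⟨?_, ?_⟩
      · rw [h1]
        congr 1
        rw [PySem.Set.ofList_cons, List.filter_cons,
          if_neg (by simp only [hpr]; exact Bool.false_ne_true),
          pv_filter_discard (PySem.Set.ofList rs)
            (fun r' => pvPathScopesOverlap s r' && !(PySem.Set.contains seen (s, r'))) r hpr]
      · intro p
        rw [h2 p]
        constructor
        · rintro (h | ⟨r', hr', ho, hp⟩)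
          · exact Or.inl h
          · exact Or.inr ⟨r', List.mem_cons_of_mem _ hr', ho, hp⟩
        · rintro (h | ⟨r', hr', ho, hp⟩)
          · exact Or.inl h
          · rcases List.mem_cons.mp hr' with rfl | hr'
            · exact absurd ho hov
            · exact Or.inr ⟨r', hr', ho, hp⟩

theorem pv_outer_spec (req : List String) (sess : List String)
    (acc : List (List (String × String))) (seen : PySem.Set (String × String)) (done : List String)
    (hseen : ∀ p : String × String, p ∈ seen ↔ (p.1 ∈ done ∧ p.2 ∈ req ∧ pvPathScopesOverlap p.1 p.2 = true)) :
    (sess.foldl (pvOuterStep req) (acc, seen)).1 =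
      acc ++ ((PySem.List.dedup sess).filter (fun s => !(done.contains s))).flatMap (pvRowList req) := by
  induction sess generalizing acc seen done with
  | nil => simp [PySem.List.dedup, PySem.Set.ofList]
  | cons s sess ih =>
    rw [List.foldl_cons]
    obtain ⟨h1, h2⟩ := pv_inner_spec s req acc seen
    have hstep : pvOuterStep req (acc, seen) s = req.foldl (pvInnerStep s) (acc, seen) := rfl
    rw [hstep]
    have hinv : ∀ p : String × String, p ∈ (req.foldl (pvInnerStep s) (acc, seen)).2 ↔
        (p.1 ∈ (s :: done) ∧ p.2 ∈ req ∧ pvPathScopesOverlap p.1 p.2 = true) := by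
      intro p
      obtain ⟨a, b⟩ := p
      rw [h2 (a, b), hseen (a, b)]
      simp only [List.mem_cons]
      constructor
      · rintro (⟨hd, hb, ho⟩ | ⟨r, hr, ho, hp⟩)
        · exact ⟨Or.inr hd, hb, ho⟩
        · cases hp
          exact ⟨Or.inl rfl, hr, ho⟩
      · rintro ⟨(rfl | hd), hb, ho⟩
        · exact Or.inr ⟨b, hb, ho, rfl⟩
        · exact Or.inl ⟨hd, hb, ho⟩
    have hmain := ih (req.foldl (pvInnerStep s) (acc, seen)).1
      (req.foldl (pvInnerStep s) (acc, seen)).2 (s :: done) hinv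
    rw [Prod.mk.eta] at hmain
    rw [hmain, h1]
    have hfd : (PySem.List.dedup sess).filter (fun t => !((s :: done).contains t))
        = (PySem.Set.discard (PySem.List.dedup sess) s).filter (fun t => !(done.contains t)) := by
      rw [← pv_filter_and_ne (PySem.List.dedup sess) (fun t => !(done.contains t)) s]
      apply List.filter_congr
      intro a _
      rw [List.contains_cons, Bool.not_or]
      exact Bool.and_comm _ _
    have hcons : PySem.List.dedup (s :: sess) = s :: PySem.Set.discard (PySem.List.dedup sess) s := by
      rw [PySem.List.dedup_eq_ofList, PySem.List.dedup_eq_ofList, PySem.Set.ofList_cons]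
    by_cases hs : s ∈ done
    · have hsb : done.contains s = true := by
        simp only [List.contains_eq_mem, decide_eq_true_eq]
        exact hs
      have hnil : (PySem.List.dedup req).filter
          (fun r => pvPathScopesOverlap s r && !(PySem.Set.contains seen (s, r))) = [] := by
        apply List.filter_eq_nil_iff.mpr
        intro r hr
        have hrreq : r ∈ req := by
          rw [PySem.List.dedup_eq_ofList] at hr
          exact (PySem.Set.mem_ofList _ _).mp hr
        cases ho : pvPathScopesOverlap s r
        · simp
        · have hmem : (s, r) ∈ seen := (hseen (s, r)).mpr ⟨hs, hrreq, ho⟩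
          have : PySem.Set.contains seen (s, r) = true := by
            simp only [PySem.Set.contains_eq_listContains, List.contains_eq_mem,
              decide_eq_true_eq]
            exact hmem
          rw [this]
          simp
      rw [hnil, List.map_nil, List.append_nil, hfd, hcons, List.filter_cons,
        if_neg (by simp only [hsb]; simp)]
    · have hsb : done.contains s = false := by
        simp only [List.contains_eq_mem, decide_eq_false_iff_not]
        exact hs
      have hflt : (PySem.List.dedup req).filter
            (fun r => pvPathScopesOverlap s r && !(PySem.Set.contains seen (s, r)))
          = (PySem.List.dedup req).filter (fun r => pvPathScopesOverlap s r) := by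
        apply List.filter_congr
        intro r hr
        have hrreq : r ∈ req := by
          rw [PySem.List.dedup_eq_ofList] at hr
          exact (PySem.Set.mem_ofList _ _).mp hr
        have hnc : (s, r) ∉ seen := fun h => hs ((hseen (s, r)).mp h).1
        have : PySem.Set.contains seen (s, r) = false := by
          simp only [PySem.Set.contains_eq_listContains, List.contains_eq_mem,
            decide_eq_false_iff_not]
          exact hnc
        rw [this]
        simp
      rw [hflt, hfd, hcons, List.filter_cons, if_pos (by rw [hsb]; rfl), List.flatMap_cons]
      rw [show ((PySem.List.dedup req).filter (fun r => pvPathScopesOverlap s r)).map (pvRow s)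
          = pvRowList req s from rfl]
      rw [List.append_assoc]

theorem pv_A_eq_flatMap (sess req : List String) :
    owned_path_overlaps_py sess req = (PySem.List.dedup sess).flatMap (pvRowList req) := by
  unfold owned_path_overlaps_py
  rw [pv_outer_spec req sess [] PySem.Set.empty []
    (by intro p; simp [PySem.Set.empty])]
  simp

-- ===== B-side lemmas =====

theorem pv_mem_segPre (t ns : List Char) :
    (t ∈ ((PySem.List.enumerate ns).filter (fun p => p.2 == '/')).map
      (fun p => PySem.List.slice ns none (some p.1)))
      ↔ PySem.Chars.startswith ns (t ++ ['/']) = true := by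
  rw [PySem.Chars.startswith_iff]
  constructor
  · intro h
    obtain ⟨p, hp, rfl⟩ := List.mem_map.mp h
    obtain ⟨hpe, hsl⟩ := List.mem_filter.mp hp
    obtain ⟨k, hk, rfl⟩ := (PySem.List.mem_enumerate_iff ns 0 p).mp hpe
    simp only [beq_iff_eq] at hsl
    have hslice : PySem.List.slice ns none (some ((0:Int) + ↑k)) = ns.take k := by
      rw [zero_add, PySem.List.slice_to_natCast]
    rw [hslice]
    have : ns.take k ++ ['/'] = ns.take (k + 1) := by
      rw [List.take_add_one, List.getElem?_eq_getElem hk, hsl]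
      rfl
    rw [this]
    exact List.take_prefix _ _
  · intro h
    have hlen : t.length + 1 ≤ ns.length := by simpa using h.length_le
    have hk : t.length < ns.length := by omega
    have ht : t = ns.take t.length := by
      have : t <+: ns := (List.prefix_append t ['/']).trans h
      exact List.prefix_iff_eq_take.mp this
    have hslash : ns[t.length] = '/' := by
      have := h.getElem (i := t.length) (by simp)
      simpa using this.symm
    refine List.mem_map.mpr ⟨((0:Int) + ↑t.length, ns[t.length]), ?_, ?_⟩
    · exact List.mem_filter.mpr ⟨(PySem.List.mem_enumerate_iff ns 0 _).mpr ⟨t.length, hk, rfl⟩,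
        by simp [hslash]⟩
    · rw [zero_add, PySem.List.slice_to_natCast, ← ht]

theorem pv_mem_segPrefixes (t ns : List Char) :
    t ∈ pvSegPrefixes ns ↔ (t = ns ∨ PySem.Chars.startswith ns (t ++ ['/']) = true) := by
  unfold pvSegPrefixes
  rw [List.mem_append, pv_mem_segPre]
  simp [or_comm]

theorem pv_startswith_lt (t ns : List Char) (h : PySem.Chars.startswith ns (t ++ ['/']) = true) :
    t.length < ns.length := by
  have := ((PySem.Chars.startswith_iff _ _).mp h).length_le
  simp at this
  omega

theorem pv_segPrefixes_nodup (ns : List Char) : (pvSegPrefixes ns).Nodup := by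
  have hpw : (pvSegPrefixes ns).Pairwise (fun a b => a.length < b.length) := by
    unfold pvSegPrefixes
    rw [List.pairwise_append]
    refine ⟨?_, List.pairwise_singleton _ _, ?_⟩
    · rw [List.pairwise_map]
      have hbase := (PySem.List.pairwise_lt_enumerate ns 0).filter (fun p => p.2 == '/')
      refine hbase.imp_of_mem ?_
      intro a b ha hb hlt
      obtain ⟨ka, hka, rfl⟩ := (PySem.List.mem_enumerate_iff ns 0 a).mp (List.mem_filter.mp ha).1
      obtain ⟨kb, hkb, rfl⟩ := (PySem.List.mem_enumerate_iff ns 0 b).mp (List.mem_filter.mp hb).1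
      simp only [zero_add] at hlt ⊢
      rw [PySem.List.slice_to_natCast, PySem.List.slice_to_natCast]
      simp only [List.length_take]
      omega
    · intro a ha b hb
      rw [List.mem_singleton] at hb
      rw [hb]
      exact pv_startswith_lt _ _ ((pv_mem_segPre a ns).mp ha)
  exact hpw.imp (fun h => fun e => absurd (congrArg List.length e) (Nat.ne_of_lt h))

theorem pv_overlap_iff (s r : String) :
    pvPathScopesOverlap s r = true ↔
      ((pvNormPathScope s).isEmpty = false ∧ (pvNormPathScope r).isEmpty = false ∧
        (pvNormPathScope s = pvNormPathScope r
          ∨ PySem.Chars.startswith (pvNormPathScope s) (pvNormPathScope r ++ ['/']) = true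
          ∨ PySem.Chars.startswith (pvNormPathScope r) (pvNormPathScope s ++ ['/']) = true)) := by
  unfold pvPathScopesOverlap
  cases hs : (pvNormPathScope s).isEmpty <;> cases hr : (pvNormPathScope r).isEmpty <;>
    simp [hs, hr, or_assoc]

theorem pv_overlap_false_of_empty (s r : String) (hs : (pvNormPathScope s).isEmpty = true) :
    pvPathScopesOverlap s r = false := by
  unfold pvPathScopesOverlap
  simp [hs]

def pvL1 (E : List (Int × String)) : List (List Char × Int) :=
  E.flatMap (fun p => if (pvNormPathScope p.2).isEmpty then [] else [(pvNormPathScope p.2, p.1)])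

def pvL2 (E : List (Int × String)) : List (List Char × Int) :=
  E.flatMap (fun p => if (pvNormPathScope p.2).isEmpty then []
    else (pvSegPrefixes (pvNormPathScope p.2)).map (fun q => (q, p.1)))

theorem pv_idx_fst (E : List (Int × String)) (d1 d2 : PySem.Dict (List Char) (List Int)) :
    (E.foldl pvIdxStep (d1, d2)).1
      = (pvL1 E).foldl (fun d p => d.modify p.1 [] (· ++ [p.2])) d1 := by
  induction E generalizing d1 d2 with
  | nil => rfl
  | cons p E ih =>
    rw [List.foldl_cons]
    unfold pvL1
    rw [List.flatMap_cons]
    by_cases h : (pvNormPathScope p.2).isEmpty = true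
    · have hstep : pvIdxStep (d1, d2) p = (d1, d2) := by simp [pvIdxStep, h]
      rw [hstep, ih]
      simp [pvL1, h]
    · have hstep : pvIdxStep (d1, d2) p
          = (d1.modify (pvNormPathScope p.2) [] (· ++ [p.1]),
             (pvSegPrefixes (pvNormPathScope p.2)).foldl
               (fun d q => d.modify q [] (· ++ [p.1])) d2) := by
        simp [pvIdxStep, h]
      rw [hstep, ih]
      simp only [h, if_false, Bool.false_eq_true, List.foldl_append, List.foldl_cons,
        List.foldl_nil]
      rfl

theorem pv_idx_snd (E : List (Int × String)) (d1 d2 : PySem.Dict (List Char) (List Int)) :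
    (E.foldl pvIdxStep (d1, d2)).2
      = (pvL2 E).foldl (fun d p => d.modify p.1 [] (· ++ [p.2])) d2 := by
  induction E generalizing d1 d2 with
  | nil => rfl
  | cons p E ih =>
    rw [List.foldl_cons]
    unfold pvL2
    rw [List.flatMap_cons]
    by_cases h : (pvNormPathScope p.2).isEmpty = true
    · have hstep : pvIdxStep (d1, d2) p = (d1, d2) := by simp [pvIdxStep, h]
      rw [hstep, ih]
      simp [pvL2, h]
    · have hstep : pvIdxStep (d1, d2) p
          = (d1.modify (pvNormPathScope p.2) [] (· ++ [p.1]),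
             (pvSegPrefixes (pvNormPathScope p.2)).foldl
               (fun d q => d.modify q [] (· ++ [p.1])) d2) := by
        simp [pvIdxStep, h]
      rw [hstep, ih]
      simp only [h, if_false, Bool.false_eq_true, List.foldl_append]
      rw [List.foldl_map]
      rfl

-- the per-index hit streams the two dictionaries hold under a key q

def pvExactIdx (E : List (Int × String)) (q : List Char) : List Int :=
  E.flatMap (fun p => if !(pvNormPathScope p.2).isEmpty && (pvNormPathScope p.2 == q)
    then [p.1] else [])

def pvCoverIdx (E : List (Int × String)) (q : List Char) : List Int :=
  E.flatMap (fun p => if !(pvNormPathScope p.2).isEmpty && decide (q ∈ pvSegPrefixes (pvNormPathScope p.2))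
    then [p.1] else [])

theorem pv_filter_beq_of_nodup {α : Type} [BEq α] [LawfulBEq α] (l : List α) (hl : l.Nodup) (q : α) :
    l.filter (fun x => x == q) = if q ∈ l then [q] else [] := by
  induction l with
  | nil => simp
  | cons x l ih =>
    rw [List.filter_cons]
    by_cases hx : x = q
    · subst hx
      have : x ∉ l := (List.nodup_cons.mp hl).1
      rw [if_pos (by simp), ih (List.nodup_cons.mp hl).2]
      simp [this]
    · rw [if_neg (by simp [hx]), ih (List.nodup_cons.mp hl).2]
      simp [Ne.symm hx]

theorem pv_exact_getD (E : List (Int × String)) (q : List Char) :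
    ((pvL1 E).filter (fun p => p.1 == q)).map (fun p => p.2) = pvExactIdx E q := by
  induction E with
  | nil => rfl
  | cons p E ih =>
    unfold pvL1 pvExactIdx
    rw [List.flatMap_cons, List.flatMap_cons, List.filter_append, List.map_append]
    unfold pvL1 pvExactIdx at ih
    rw [ih]
    congr 1
    by_cases h : (pvNormPathScope p.2).isEmpty = true
    · simp [h]
    · simp only [h, if_false, Bool.false_eq_true, Bool.not_false, Bool.true_and]
      by_cases hq : pvNormPathScope p.2 = q
      · simp [hq]
      · simp [hq]

theorem pv_cover_getD (E : List (Int × String)) (q : List Char) :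
    ((pvL2 E).filter (fun p => p.1 == q)).map (fun p => p.2) = pvCoverIdx E q := by
  induction E with
  | nil => rfl
  | cons p E ih =>
    unfold pvL2 pvCoverIdx
    rw [List.flatMap_cons, List.flatMap_cons, List.filter_append, List.map_append]
    unfold pvL2 pvCoverIdx at ih
    rw [ih]
    congr 1
    by_cases h : (pvNormPathScope p.2).isEmpty = true
    · simp [h]
    · simp only [h, if_false, Bool.false_eq_true, Bool.not_false, Bool.true_and]
      rw [List.filter_map]
      have : ((pvSegPrefixes (pvNormPathScope p.2)).filter
          ((fun x => x.1 == q) ∘ (fun q' => (q', p.1)))) =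
          (pvSegPrefixes (pvNormPathScope p.2)).filter (fun x => x == q) := by
        apply List.filter_congr
        intro a _
        rfl
      rw [this, pv_filter_beq_of_nodup _ (pv_segPrefixes_nodup _) q]
      by_cases hq : q ∈ pvSegPrefixes (pvNormPathScope p.2)
      · simp [hq]
      · simp [hq]

theorem pv_mem_flatMap_sing {α : Type} (l : List (Int × α)) (f : Int × α → Bool) (i : Int) :
    i ∈ l.flatMap (fun p => if f p then [p.1] else []) ↔ ∃ p ∈ l, f p = true ∧ i = p.1 := by
  rw [List.mem_flatMap]
  constructor
  · rintro ⟨p, hp, hi⟩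
    by_cases h : f p = true
    · rw [if_pos h] at hi
      exact ⟨p, hp, h, List.mem_singleton.mp hi⟩
    · rw [if_neg h] at hi
      exact absurd hi (List.not_mem_nil)
  · rintro ⟨p, hp, hf, rfl⟩
    exact ⟨p, hp, by rw [if_pos hf]; exact List.mem_singleton.mpr rfl⟩

theorem pv_pairwise_flatMap_sing {α : Type} (l : List (Int × α)) (f : Int × α → Bool)
    (hl : l.Pairwise (fun a b => a.1 < b.1)) :
    (l.flatMap (fun p => if f p then [p.1] else [])).Pairwise (fun a b : Int => a < b) := by
  induction l with
  | nil => simp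
  | cons p l ih =>
    rw [List.flatMap_cons, List.pairwise_append]
    obtain ⟨hhd, htl⟩ := List.pairwise_cons.mp hl
    refine ⟨?_, ih htl, ?_⟩
    · by_cases h : f p = true
      · rw [if_pos h]; exact List.pairwise_singleton _ _
      · rw [if_neg h]; exact List.Pairwise.nil
    · intro a ha b hb
      have ha' : a = p.1 := by
        by_cases h : f p = true
        · rw [if_pos h] at ha; exact List.mem_singleton.mp ha
        · rw [if_neg h] at ha; exact absurd ha (List.not_mem_nil)
      obtain ⟨q, hq, _, rfl⟩ := (pv_mem_flatMap_sing l f b).mp hb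
      rw [ha']
      exact hhd q hq

theorem pv_nodup_of_pairwise_lt (l : List Int) (h : l.Pairwise (fun a b => a < b)) : l.Nodup :=
  h.imp (fun hlt => fun e => absurd e (by omega))

theorem pv_mem_exactIdx (E : List (Int × String)) (q : List Char) (i : Int) :
    i ∈ pvExactIdx E q ↔ ∃ p ∈ E, (pvNormPathScope p.2).isEmpty = false ∧ pvNormPathScope p.2 = q ∧ i = p.1 := by
  unfold pvExactIdx
  rw [pv_mem_flatMap_sing]
  constructor
  · rintro ⟨p, hp, hf, rfl⟩
    simp only [Bool.and_eq_true, Bool.not_eq_true', beq_iff_eq] at hf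
    exact ⟨p, hp, hf.1, hf.2, rfl⟩
  · rintro ⟨p, hp, h1, h2, rfl⟩
    refine ⟨p, hp, ?_, rfl⟩
    rw [h2] at h1 ⊢
    simp [h1]

theorem pv_mem_coverIdx (E : List (Int × String)) (q : List Char) (i : Int) :
    i ∈ pvCoverIdx E q ↔ ∃ p ∈ E, (pvNormPathScope p.2).isEmpty = false ∧ q ∈ pvSegPrefixes (pvNormPathScope p.2) ∧ i = p.1 := by
  unfold pvCoverIdx
  rw [pv_mem_flatMap_sing]
  constructor
  · rintro ⟨p, hp, hf, rfl⟩
    simp only [Bool.and_eq_true, Bool.not_eq_true', decide_eq_true_eq] at hf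
    exact ⟨p, hp, hf.1, hf.2, rfl⟩
  · rintro ⟨p, hp, h1, h2, rfl⟩
    exact ⟨p, hp, by simp [h1, h2], rfl⟩

def pvSegPre (ns : List Char) : List (List Char) :=
  ((PySem.List.enumerate ns).filter (fun p => p.2 == '/')).map
    (fun p => PySem.List.slice ns none (some p.1))

theorem pv_dropLast_segPrefixes (ns : List Char) :
    (pvSegPrefixes ns).dropLast = pvSegPre ns := by
  unfold pvSegPrefixes pvSegPre
  exact List.dropLast_concat

theorem pv_segPre_nodup (ns : List Char) : (pvSegPre ns).Nodup := by
  rw [← pv_dropLast_segPrefixes]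
  exact (pv_segPrefixes_nodup ns).sublist (List.dropLast_sublist _)

set_option maxHeartbeats 1000000 in
theorem pv_mem_hits (l : List String) (s : String)
    (hns : (pvNormPathScope s).isEmpty = false) (i : Int) :
    (i ∈ pvCoverIdx (PySem.List.enumerate l) (pvNormPathScope s)
        ++ (pvSegPre (pvNormPathScope s)).flatMap (pvExactIdx (PySem.List.enumerate l)))
      ↔ ∃ k, ∃ _ : k < l.length, i = (k : Int) ∧ pvPathScopesOverlap s l[k] = true := by
  rw [List.mem_append, List.mem_flatMap]
  constructor
  · rintro (hc | ⟨q, hq, he⟩)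
    · obtain ⟨p, hp, hne, hseg, rfl⟩ := (pv_mem_coverIdx _ _ _).mp hc
      obtain ⟨k, hk, rfl⟩ := (PySem.List.mem_enumerate_iff l 0 p).mp hp
      refine ⟨k, hk, by simp, ?_⟩
      rw [pv_overlap_iff]
      refine ⟨hns, hne, ?_⟩
      rcases (pv_mem_segPrefixes _ _).mp hseg with h | h
      · exact Or.inl h
      · exact Or.inr (Or.inr h)
    · obtain ⟨p, hp, hne, hq', rfl⟩ := (pv_mem_exactIdx _ _ _).mp he
      obtain ⟨k, hk, rfl⟩ := (PySem.List.mem_enumerate_iff l 0 p).mp hp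
      refine ⟨k, hk, by simp, ?_⟩
      rw [pv_overlap_iff]
      refine ⟨hns, hne, Or.inr (Or.inl ?_)⟩
      rw [hq']
      exact (pv_mem_segPre q _).mp hq
  · rintro ⟨k, hk, rfl, hov⟩
    rw [pv_overlap_iff] at hov
    obtain ⟨_, hne, hdisj⟩ := hov
    have hpmem : ((k : Int), l[k]) ∈ PySem.List.enumerate l :=
      (PySem.List.mem_enumerate_iff l 0 _).mpr ⟨k, hk, by simp⟩
    rcases hdisj with h | h | h
    · exact Or.inl ((pv_mem_coverIdx _ _ _).mpr
        ⟨_, hpmem, hne, (pv_mem_segPrefixes _ _).mpr (Or.inl h), rfl⟩)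
    · exact Or.inr ⟨pvNormPathScope l[k],
        (pv_mem_segPre _ _).mpr h,
        (pv_mem_exactIdx _ _ _).mpr ⟨_, hpmem, hne, rfl, rfl⟩⟩
    · exact Or.inl ((pv_mem_coverIdx _ _ _).mpr
        ⟨_, hpmem, hne, (pv_mem_segPrefixes _ _).mpr (Or.inr h), rfl⟩)
theorem pv_enum_fst_inj (l : List String) (p p' : Int × String)
    (hp : p ∈ PySem.List.enumerate l) (hp' : p' ∈ PySem.List.enumerate l)
    (h : p.1 = p'.1) : p = p' := by
  obtain ⟨k, hk, rfl⟩ := (PySem.List.mem_enumerate_iff l 0 p).mp hp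
  obtain ⟨k', hk', rfl⟩ := (PySem.List.mem_enumerate_iff l 0 p').mp hp'
  simp only [zero_add] at h
  have : k = k' := by exact_mod_cast h
  subst this
  rfl
theorem pv_nodup_hits (l : List String) (s : String) :
    (pvCoverIdx (PySem.List.enumerate l) (pvNormPathScope s)
        ++ (pvSegPre (pvNormPathScope s)).flatMap (pvExactIdx (PySem.List.enumerate l))).Nodup := by
  have hpwE := PySem.List.pairwise_lt_enumerate l 0
  rw [List.nodup_append]
  refine ⟨?_, ?_, ?_⟩
  · exact pv_nodup_of_pairwise_lt _ (pv_pairwise_flatMap_sing _ _ hpwE)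
  · rw [List.nodup_flatMap]
    refine ⟨fun q _ => pv_nodup_of_pairwise_lt _ (pv_pairwise_flatMap_sing _ _ hpwE), ?_⟩
    have hnd := pv_segPre_nodup (pvNormPathScope s)
    refine hnd.imp ?_
    intro q q' hne i hi hi'
    obtain ⟨p, hp, _, hq, rfl⟩ := (pv_mem_exactIdx _ _ _).mp hi
    obtain ⟨p', hp', _, hq', he⟩ := (pv_mem_exactIdx _ _ _).mp hi'
    have : p = p' := pv_enum_fst_inj l p p' hp hp' he
    subst this
    exact hne (hq ▸ hq')
  · intro i hi j hj heq
    subst heq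
    obtain ⟨p, hp, _, hseg, rfl⟩ := (pv_mem_coverIdx _ _ _).mp hi
    obtain ⟨q, hq, hie⟩ := List.mem_flatMap.mp hj
    obtain ⟨p', hp', _, hq', he⟩ := (pv_mem_exactIdx _ _ _).mp hie
    have hpp : p = p' := pv_enum_fst_inj l p p' hp hp' he
    subst hpp
    -- cover: |ns| ≤ |norm p.2|; ancestor: |norm p.2| < |ns|  — contradiction
    have h1 : (pvNormPathScope s).length ≤ (pvNormPathScope p.2).length := by
      rcases (pv_mem_segPrefixes _ _).mp hseg with h | h
      · rw [h]
      · exact Nat.le_of_lt (pv_startswith_lt _ _ h)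
    have h2 : (pvNormPathScope p.2).length < (pvNormPathScope s).length := by
      rw [hq']
      exact pv_startswith_lt _ _ ((pv_mem_segPre q _).mp hq)
    omega
theorem pv_mem_ys (l : List String) (s : String) (i : Int) :
    i ∈ (PySem.List.pyRange 0 l.length 1).filter
        (fun j => pvPathScopesOverlap s (PySem.List.pyGetD l j ""))
      ↔ ∃ k, ∃ _ : k < l.length, i = (k : Int) ∧ pvPathScopesOverlap s l[k] = true := by
  rw [List.mem_filter, PySem.List.mem_pyRange_one]
  constructor
  · rintro ⟨⟨h0, hn⟩, hov⟩
    refine ⟨i.toNat, by omega, by omega, ?_⟩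
    rwa [PySem.List.pyGetD_eq_getElem l "" h0 (by exact_mod_cast hn)] at hov
  · rintro ⟨k, hk, rfl, hov⟩
    refine ⟨⟨by positivity, by exact_mod_cast hk⟩, ?_⟩
    rwa [PySem.List.pyGetD_natCast, List.getD_eq_getElem l "" hk]
theorem pv_sorted_hits (l : List String) (s : String)
    (hns : (pvNormPathScope s).isEmpty = false) :
    PySem.List.sorted
      (pvCoverIdx (PySem.List.enumerate l) (pvNormPathScope s)
        ++ (pvSegPre (pvNormPathScope s)).flatMap (pvExactIdx (PySem.List.enumerate l)))
      (fun x => x) false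
    = (PySem.List.pyRange 0 l.length 1).filter
        (fun j => pvPathScopesOverlap s (PySem.List.pyGetD l j "")) := by
  apply PySem.List.sorted_eq_of_perm_of_pairwise_lt
  · rw [List.perm_ext_iff_of_nodup
      (pv_nodup_of_pairwise_lt _ ((PySem.List.pairwise_lt_pyRange_one 0 l.length).filter _))
      (pv_nodup_hits l s)]
    intro i
    rw [pv_mem_ys, pv_mem_hits l s hns]
  · exact (PySem.List.pairwise_lt_pyRange_one 0 l.length).filter _
theorem pv_range_filter_map_nat {β : Type} (l : List String) (p : String → Bool) (f : String → β) :
    ((List.range l.length).filter (fun k => p (l.getD k ""))).map (fun k => f (l.getD k ""))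
      = (l.filter p).map f := by
  induction l with
  | nil => rfl
  | cons x l ih =>
    rw [List.length_cons, List.range_succ_eq_map, List.filter_cons]
    have htail : ((List.map Nat.succ (List.range l.length)).filter
          (fun k => p ((x :: l).getD k ""))).map (fun k => f ((x :: l).getD k ""))
        = ((List.range l.length).filter (fun k => p (l.getD k ""))).map (fun k => f (l.getD k "")) := by
      rw [List.filter_map, List.map_map]
      have h1 : ((fun k => p ((x :: l).getD k "")) ∘ Nat.succ) = (fun k => p (l.getD k "")) := by
        funext k
        rfl
      have h2 : ((fun k => f ((x :: l).getD k "")) ∘ Nat.succ) = (fun k => f (l.getD k "")) := by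
        funext k
        rfl
      rw [h1, h2]
    by_cases hx : p x = true
    · rw [if_pos (by simpa using hx), List.map_cons, htail, ih]
      have : (x :: l).filter p = x :: l.filter p := by
        rw [List.filter_cons, if_pos hx]
      rw [this, List.map_cons]
      rfl
    · rw [if_neg (by simpa using hx), htail, ih]
      have : (x :: l).filter p = l.filter p := by
        rw [List.filter_cons, if_neg hx]
      rw [this]
theorem pv_range_filter_map {β : Type} (l : List String) (p : String → Bool) (f : String → β) :
    ((PySem.List.pyRange 0 (l.length : Int) 1).filter
        (fun i => p (PySem.List.pyGetD l i ""))).map (fun i => f (PySem.List.pyGetD l i ""))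
      = (l.filter p).map f := by
  rw [PySem.List.pyRange_one]
  simp only [sub_zero, Int.toNat_natCast, zero_add]
  rw [List.filter_map, List.map_map]
  have h1 : ((fun i => p (PySem.List.pyGetD l i "")) ∘ (fun k : Nat => (k : Int)))
      = (fun k : Nat => p (l.getD k "")) := by
    funext k
    simp [PySem.List.pyGetD_natCast]
  have h2 : ((fun i => f (PySem.List.pyGetD l i "")) ∘ (fun k : Nat => (k : Int)))
      = (fun k : Nat => f (l.getD k "")) := by
    funext k
    simp [PySem.List.pyGetD_natCast]
  rw [h1, h2]
  exact pv_range_filter_map_nat l p f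
set_option maxHeartbeats 1000000 in
theorem pv_B_eq_flatMap (sess req : List String) :
    owned_path_overlaps_py_alt sess req = (PySem.List.dedup sess).flatMap (pvRowList req) := by
  have hE1 : ∀ q, ((PySem.List.enumerate (PySem.List.dedup req)).foldl pvIdxStep
      (PySem.Dict.empty, PySem.Dict.empty)).1.getD q []
      = pvExactIdx (PySem.List.enumerate (PySem.List.dedup req)) q := by
    intro q
    rw [pv_idx_fst, PySem.Dict.getD_foldl_modify_append, PySem.Dict.getD_empty,
      List.nil_append, pv_exact_getD]
  have hE2 : ∀ q, ((PySem.List.enumerate (PySem.List.dedup req)).foldl pvIdxStep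
      (PySem.Dict.empty, PySem.Dict.empty)).2.getD q []
      = pvCoverIdx (PySem.List.enumerate (PySem.List.dedup req)) q := by
    intro q
    rw [pv_idx_snd, PySem.Dict.getD_foldl_modify_append, PySem.Dict.getD_empty,
      List.nil_append, pv_cover_getD]
  show (PySem.List.dedup sess).foldl
      (fun overlaps s =>
        if (pvNormPathScope s).isEmpty then overlaps
        else
          overlaps ++ (PySem.List.sorted
            ((PySem.List.slice (pvSegPrefixes (pvNormPathScope s)) none (some (-1))).foldl
              (fun h q => h ++ ((PySem.List.enumerate (PySem.List.dedup req)).foldl pvIdxStep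
                (PySem.Dict.empty, PySem.Dict.empty)).1.getD q [])
              (((PySem.List.enumerate (PySem.List.dedup req)).foldl pvIdxStep
                (PySem.Dict.empty, PySem.Dict.empty)).2.getD (pvNormPathScope s) []))
            (fun x => x) false).map
            (fun i => [("session_owned_path", s),
                       ("requested_owned_path", PySem.List.pyGetD (PySem.List.dedup req) i "")]))
      [] = _
  have hfun : (fun (overlaps : List (List (String × String))) (s : String) =>
        if (pvNormPathScope s).isEmpty then overlaps
        else
          overlaps ++ (PySem.List.sorted
            ((PySem.List.slice (pvSegPrefixes (pvNormPathScope s)) none (some (-1))).foldl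
              (fun h q => h ++ ((PySem.List.enumerate (PySem.List.dedup req)).foldl pvIdxStep
                (PySem.Dict.empty, PySem.Dict.empty)).1.getD q [])
              (((PySem.List.enumerate (PySem.List.dedup req)).foldl pvIdxStep
                (PySem.Dict.empty, PySem.Dict.empty)).2.getD (pvNormPathScope s) []))
            (fun x => x) false).map
            (fun i => [("session_owned_path", s),
                       ("requested_owned_path", PySem.List.pyGetD (PySem.List.dedup req) i "")]))
      = (fun overlaps s => overlaps ++ pvRowList req s) := by
    funext overlaps s
    by_cases hns : (pvNormPathScope s).isEmpty = true
    · rw [if_pos hns]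
      have hnil : pvRowList req s = [] := by
        unfold pvRowList
        rw [List.filter_eq_nil_iff.mpr, List.map_nil]
        intro r _
        rw [pv_overlap_false_of_empty s r hns]
        exact Bool.false_ne_true
      rw [hnil, List.append_nil]
    · rw [if_neg hns]
      congr 1
      rw [PySem.List.slice_to_neg_one, pv_dropLast_segPrefixes,
        PySem.List.foldl_append_eq_flatMap, hE2]
      simp only [hE1]
      rw [pv_sorted_hits (PySem.List.dedup req) s (Bool.not_eq_true _ ▸ Bool.eq_false_iff.mpr hns)]
      exact pv_range_filter_map (PySem.List.dedup req)
        (fun r => pvPathScopesOverlap s r) (pvRow s)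
  rw [hfun, PySem.List.foldl_append_eq_flatMap, List.nil_append]

-- ===== VERDICT (by name: the statement is the Claim_ definition above) =====
theorem owned_path_overlaps_py_spec : Claim_equal_owned_path_overlaps_py := by
  intro sess req _
  unfold Spec_owned_path_overlaps_py
  rw [pv_A_eq_flatMap, pv_B_eq_flatMap]
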